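-- pv_equiv track=rewrite | github.com/Munbin-Lee/BOJ_Python | Programmers/43236.py | solution
-- ===== SOURCE A (Python) =====
-- from itertools import combinations
--
-- def removeRock(diff, idxs):
--     d = diff[:]
--     cnt = 0
--     for idx in idxs:
--         tmp = d.pop(idx-cnt)
--         d[idx-cnt] += tmp
--         cnt += 1
--     return d
--
-- def solution(distance, rocks, n):
--     rocks.sort()
--     rocks.insert(0, 0)
--     rocks.append(distance)
--     diff = []
--
--     for i in range(1, len(rocks)):
--         diff.append(rocks[i]-rocks[i-1])
--
--     mx = 0
--     for ls in list(combinations(range(len(diff)-1), n)):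
--         mx = max(mx, min(removeRock(diff, ls)))
--     return mx
-- ===== SOURCE B (Python) =====
-- # B: take/skip recursion over the sorted rock list carrying the last kept point and the
-- # removal budget, instead of materialising all index combinations and pop-merging a copy
-- # of the gap list for each.  (A mutates `rocks` in place; B does not — return value only.)
-- def go(prev, pts, k):
--     # best (max over choices) minimum gap over points pts (last one fixed), coming from
--     # prev, with exactly k removals still to spend; None = impossible
--     if k >= len(pts):            # more removals left than removable points
--         return None
--     if len(pts) == 1:            # only the fixed endpoint remains
--         return pts[0] - prev
--     x, rest = pts[0], pts[1:]
--     keep = go(x, rest, k)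
--     if keep is not None:
--         keep = min(x - prev, keep)
--     drop = go(prev, rest, k - 1) if k > 0 else None
--     if keep is None:
--         return drop
--     if drop is None:
--         return keep
--     return max(keep, drop)
--
-- def solution(distance, rocks, n):
--     pts = sorted(rocks) + [distance]
--     best = go(0, pts, n)
--     return max(0, best) if best is not None else 0
-- ===== Notes on version B (the rewrite author's own statement) =====
-- stated objective: alternative
-- what changed: Replaces A's enumeration of all removal-index combinations (each processed by copying the gap list and pop-merging it, then taking its min) with a single take/skip recursion over the sorted rock list that carries the last kept point and the remaining removal budget and computes the running minimum on the fly, never building index tuples or intermediate gap lists.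
import Mathlib
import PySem

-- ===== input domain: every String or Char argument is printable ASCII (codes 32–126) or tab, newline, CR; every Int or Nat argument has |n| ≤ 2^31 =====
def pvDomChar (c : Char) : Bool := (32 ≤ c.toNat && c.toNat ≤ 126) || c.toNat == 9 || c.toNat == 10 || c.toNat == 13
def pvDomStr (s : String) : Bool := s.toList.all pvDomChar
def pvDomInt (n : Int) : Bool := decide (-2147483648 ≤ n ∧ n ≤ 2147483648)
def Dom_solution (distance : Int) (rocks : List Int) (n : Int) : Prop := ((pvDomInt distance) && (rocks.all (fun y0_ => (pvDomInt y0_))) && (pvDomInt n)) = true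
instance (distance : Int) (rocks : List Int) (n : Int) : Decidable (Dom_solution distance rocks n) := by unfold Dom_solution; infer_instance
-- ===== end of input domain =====

-- B replaces A's enumeration of removal-index combinations (pop-merging a copied gap list per
-- combination) by a take/skip recursion over the sorted rocks; return value only (A mutates `rocks`).


-- ===== PORT A =====

-- hand port of `d[i] += v`; exact for the nonnegative in-range indices this program reaches
-- (Python would wrap a negative index or raise out of range — never reached from `solution`)
def pvSetAdd (l : List Int) (i : Int) (v : Int) : List Int :=
  match l with
  | [] => []
  | x :: xs => if i ≤ 0 then (x + v) :: xs else x :: pvSetAdd xs (i - 1) v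

def removeRockAux (d : List Int) (cnt : Int) (idxs : List Int) : List Int :=
  match idxs with
  | [] => d
  | idx :: rest =>
    match PySem.List.pop? d (idx - cnt) with
    | some (tmp, d') => removeRockAux (pvSetAdd d' (idx - cnt) tmp) (cnt + 1) rest
    | none => removeRockAux d (cnt + 1) rest   -- Python raises IndexError here; unreachable from `solution`

def removeRock (diff : List Int) (idxs : List Int) : List Int :=
  removeRockAux diff 0 idxs

def solution (distance : Int) (rocks : List Int) (n : Int) : Int :=
  let s := PySem.List.sorted rocks (fun x => x) false
  let r2 := PySem.List.insert s 0 0 ++ [distance]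
  let diff := (PySem.List.pyRange 1 ((r2.length : Int)) 1).foldl
      (fun acc i => acc ++ [PySem.List.pyGetD r2 i 0 - PySem.List.pyGetD r2 (i - 1) 0]) []
  -- combinations(..., n) raises ValueError for n < 0 (excluded by Pre_); min() on an empty
  -- list is unreachable (the merged list always keeps at least one element)
  if n < 0 then 0
  else
    (PySem.List.combinations (PySem.List.pyRange 0 ((diff.length : Int) - 1) 1) n.toNat).foldl
      (fun mx ls => max mx ((PySem.List.min? (removeRock diff ls) (fun x => x)).getD 0)) 0

-- ===== PORT B =====

def go (prev : Int) (pts : List Int) (k : Int) : Option Int :=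
  if (pts.length : Int) ≤ k then none
  else
    match pts with
    | [] => none        -- unreachable: Python would index pts[0]; `solution` always passes a nonempty list
    | [x] => some (x - prev)
    | x :: rest =>
      let keep := match go x rest k with
        | some m => some (min (x - prev) m)
        | none => none
      let drop := if 0 < k then go prev rest (k - 1) else none
      match keep, drop with
      | none, d => d
      | some m, none => some m
      | some m, some m' => some (max m m')

def solution_alt (distance : Int) (rocks : List Int) (n : Int) : Int :=
  let pts := PySem.List.sorted rocks (fun x => x) false ++ [distance]
  match go 0 pts n with
  | some best => max 0 best
  | none => 0

-- ===== PRECONDITION & SPEC =====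

def Pre_solution (distance : Int) (rocks : List Int) (n : Int) : Prop := 0 ≤ n
instance (distance : Int) (rocks : List Int) (n : Int) : Decidable (Pre_solution distance rocks n) := by
  unfold Pre_solution; infer_instance

def pvWitness_solution : Int × List Int × Int := (25, [2, 14, 11, 21, 17], 2)

def Spec_solution (distance : Int) (rocks : List Int) (n : Int) (out : Int) : Prop := out = solution_alt distance rocks n
instance (distance : Int) (rocks : List Int) (n : Int) (out : Int) : Decidable (Spec_solution distance rocks n out) := by unfold Spec_solution; infer_instance

-- ===== CLAIM (what is proved, stated in full; the proofs are below) =====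
def Claim_equal_solution : Prop := ∀ (distance : Int) (rocks : List Int) (n : Int), Dom_solution distance rocks n → Pre_solution distance rocks n → Spec_solution distance rocks n (solution distance rocks n)

-- ===== LEMMAS AND PROOFS =====

-- the list of consecutive gaps of the points `l`, coming from `prev`
def gaps (prev : Int) (l : List Int) : List Int :=
  match l with
  | [] => []
  | x :: xs => (x - prev) :: gaps x xs

-- running maximum of a list as an Option (none on [])
def ostep (acc : Option Int) (v : Int) : Option Int :=
  some (match acc with | none => v | some m => max m v)
def omax (l : List Int) : Option Int := l.foldl ostep none
def omerge (o1 o2 : Option Int) : Option Int :=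
  match o1, o2 with
  | none, d => d
  | some m, none => some m
  | some m, some m' => some (max m m')

-- A's `min(...)` applied to the (always nonempty) merged gap list
def minof (l : List Int) : Int := (PySem.List.min? l (fun x => x)).getD 0

-- 0,1,…,m-1 as integers (A's `range(len(diff)-1)`)
def pvBase (m : Nat) : List Int := (List.range m).map (fun j => Int.ofNat j)

theorem gaps_length (prev : Int) (l : List Int) : (gaps prev l).length = l.length := by
  induction l generalizing prev with
  | nil => rfl
  | cons x xs ih => simp [gaps, ih]

theorem pvSetAdd_length (l : List Int) (i v : Int) : (pvSetAdd l i v).length = l.length := by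
  induction l generalizing i with
  | nil => rfl
  | cons x xs ih => simp only [pvSetAdd]; split <;> simp [ih]

theorem foldl_ostep_some (l : List Int) (a : Int) :
    l.foldl ostep (some a) = some (l.foldl max a) := by
  induction l generalizing a with
  | nil => rfl
  | cons h t ih => simpa [ostep] using ih (max a h)

theorem foldl_max_shift (l : List Int) (a b : Int) :
    l.foldl max (max a b) = max a (l.foldl max b) := by
  induction l generalizing b with
  | nil => rfl
  | cons h t ih => simpa [max_assoc] using ih (max b h)

theorem foldl_min_shift (l : List Int) (a b : Int) :
    l.foldl min (min a b) = min a (l.foldl min b) := by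
  induction l generalizing b with
  | nil => rfl
  | cons h t ih => simpa [min_assoc] using ih (min b h)

theorem omax_append (L1 L2 : List Int) : omax (L1 ++ L2) = omerge (omax L1) (omax L2) := by
  cases L1 with
  | nil => simp [omax, omerge]
  | cons h t =>
    show ((h :: t) ++ L2).foldl ostep none = _
    rw [List.foldl_append]
    show L2.foldl ostep (omax (h :: t)) = _
    have h1 : omax (h :: t) = some (t.foldl max h) := by
      simpa [omax, ostep] using foldl_ostep_some t h
    rw [h1]
    cases L2 with
    | nil => rfl
    | cons h2 t2 =>
      have h2' : omax (h2 :: t2) = some (t2.foldl max h2) := by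
        simpa [omax, ostep] using foldl_ostep_some t2 h2
      rw [h2']
      show List.foldl ostep (some _) _ = _
      rw [foldl_ostep_some]
      simp only [omerge, List.foldl_cons, foldl_max_shift]

theorem omax_map_min (l : List Int) (a : Int) :
    omax (l.map (fun v => min a v)) = Option.map (fun m => min a m) (omax l) := by
  cases l with
  | nil => simp [omax]
  | cons h t =>
    have key : ∀ (t : List Int) (h : Int),
        (t.map (fun v => min a v)).foldl max (min a h) = min a (t.foldl max h) := by
      intro t
      induction t with
      | nil => intro h; rfl
      | cons h2 t2 ih =>
        intro h
        simp only [List.map_cons, List.foldl_cons]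
        rw [← min_max_distrib_left, ih]
    simp only [omax, List.map_cons, List.foldl_cons]
    show (t.map (fun v => min a v)).foldl ostep (some (min a h)) =
      Option.map (fun m => min a m) (t.foldl ostep (some h))
    rw [foldl_ostep_some, foldl_ostep_some]
    simp [key]

theorem minof_cons (g : Int) (l : List Int) (h : l ≠ []) :
    minof (g :: l) = min g (minof l) := by
  cases l with
  | nil => exact absurd rfl h
  | cons h2 t2 =>
    unfold minof
    rw [PySem.List.min?_id_cons, PySem.List.min?_id_cons]
    simp [List.foldl_cons, foldl_min_shift]

theorem foldl_max_zero (l : List Int) :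
    l.foldl max 0 = match omax l with | none => 0 | some m => max 0 m := by
  cases l with
  | nil => rfl
  | cons h t =>
    have : omax (h :: t) = some (t.foldl max h) := by
      simpa [omax, ostep] using foldl_ostep_some t h
    rw [this]
    simp [List.foldl_cons, foldl_max_shift]

theorem rr_shift (c : List Int) (d : List Int) (cnt : Int) :
    removeRockAux d (cnt + 1) (c.map (fun z => z + 1)) = removeRockAux d cnt c := by
  induction c generalizing d cnt with
  | nil => rfl
  | cons i ct ih =>
    simp only [List.map_cons, removeRockAux]
    have e : i + 1 - (cnt + 1) = i - cnt := by ring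
    rw [e]
    cases hp : PySem.List.pop? d (i - cnt) with
    | none => exact ih d (cnt + 1)
    | some r => exact ih _ (cnt + 1)

theorem rr_cons_skip (c : List Int) (g0 : Int) (d' : List Int) (cnt : Int)
    (hb : ∀ i ∈ c, cnt + 1 ≤ i ∧ i ≤ (d'.length : Int) + cnt - 1)
    (hp : c.Pairwise (· < ·)) :
    removeRockAux (g0 :: d') cnt c = g0 :: removeRockAux d' (cnt + 1) c := by
  induction c generalizing d' cnt with
  | nil => rfl
  | cons i ct ih =>
    obtain ⟨h1, h2⟩ := hb i (List.mem_cons_self)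
    have hlen2 : 2 ≤ d'.length + 1 := by omega
    obtain ⟨j', hj'⟩ : ∃ j', (i - cnt).toNat = j' + 1 := ⟨(i - cnt).toNat - 1, by omega⟩
    have hji : ((j' + 1 : Nat) : Int) = i - cnt := by omega
    have hjlt : j' + 1 < (g0 :: d').length := by simp only [List.length_cons]; omega
    have hjlt' : j' < d'.length := by omega
    have hpop1 : PySem.List.pop? (g0 :: d') (i - cnt) =
        some ((g0 :: d')[j' + 1], (g0 :: d').eraseIdx (j' + 1)) := by
      rw [← hji]; exact PySem.List.pop?_natCast _ _ hjlt
    have hpop2 : PySem.List.pop? d' (i - (cnt + 1)) = some (d'[j'], d'.eraseIdx j') := by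
      have hc : ((j' : Nat) : Int) = i - (cnt + 1) := by omega
      rw [← hc]; exact PySem.List.pop?_natCast _ _ hjlt'
    simp only [removeRockAux, hpop1, hpop2]
    rw [List.getElem_cons_succ, List.eraseIdx_cons_succ]
    have hset : pvSetAdd (g0 :: d'.eraseIdx j') (i - cnt) d'[j'] =
        g0 :: pvSetAdd (d'.eraseIdx j') (i - (cnt + 1)) d'[j'] := by
      simp only [pvSetAdd]
      rw [if_neg (by omega)]
      congr 1
      congr 1
      omega
    rw [hset]
    have hel : (pvSetAdd (d'.eraseIdx j') (i - (cnt + 1)) d'[j']).length = d'.length - 1 := by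
      rw [pvSetAdd_length, List.length_eraseIdx_of_lt hjlt']
    apply ih
    · intro i2 hi2
      obtain ⟨hb1, hb2⟩ := hb i2 (List.mem_cons_of_mem _ hi2)
      have hlt : i < i2 := (List.pairwise_cons.mp hp).1 i2 hi2
      rw [hel]
      omega
    · exact (List.pairwise_cons.mp hp).2

theorem rr_head0 (a b : Int) (l : List Int) (c : List Int) :
    removeRockAux (a :: b :: l) 0 (0 :: c) = removeRockAux ((b + a) :: l) 1 c := by
  have hpop : PySem.List.pop? (a :: b :: l) ((0 : Int) - 0) = some (a, b :: l) := by
    have h0 : ((0 : Nat) : Int) = (0 : Int) - 0 := by norm_num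
    rw [← h0]
    have h := PySem.List.pop?_natCast (a :: b :: l) 0 (by simp)
    rw [h]
    rfl
  simp only [removeRockAux, hpop]
  have : pvSetAdd (b :: l) ((0 : Int) - 0) a = (b + a) :: l := by
    simp [pvSetAdd]
  rw [this]
  norm_num

theorem rr_len_ge (c : List Int) (d : List Int) (cnt : Int) :
    d.length ≤ (removeRockAux d cnt c).length + c.length := by
  induction c generalizing d cnt with
  | nil => simp [removeRockAux]
  | cons i ct ih =>
    simp only [removeRockAux]
    cases hp : PySem.List.pop? d (i - cnt) with
    | none =>
      have := ih d (cnt + 1)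
      simp only [List.length_cons]; omega
    | some r =>
      obtain ⟨v, d'⟩ := r
      have hlen : d'.length + 1 = d.length :=
        PySem.List.length_of_pop?_eq_some d (r := (v, d')) hp
      have := ih (pvSetAdd d' (i - cnt) v) (cnt + 1)
      rw [pvSetAdd_length] at this
      simp only [List.length_cons]; omega

theorem pvBase_succ (m : Nat) : pvBase (m + 1) = 0 :: (pvBase m).map (fun z => z + 1) := by
  unfold pvBase
  rw [List.range_succ_eq_map, List.map_cons, List.map_map, List.map_map]
  rw [show Int.ofNat 0 = 0 from rfl]
  congr 1

theorem mem_pvBase {i : Int} {m : Nat} (h : i ∈ pvBase m) : 0 ≤ i ∧ i ≤ (m : Int) - 1 := by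
  unfold pvBase at h
  obtain ⟨j, hj, rfl⟩ := List.mem_map.mp h
  have := List.mem_range.mp hj
  simp only [Int.ofNat_eq_natCast]
  omega

theorem pvBase_pairwise (m : Nat) : (pvBase m).Pairwise (· < ·) := by
  unfold pvBase
  refine List.Pairwise.map _ ?_ (List.pairwise_lt_range)
  intro a b hab
  simp only [Int.ofNat_eq_natCast]
  exact_mod_cast hab

-- the heart of the equivalence: B's recursion computes the max over A's combinations
theorem goSpec (pts : List Int) (hne : pts ≠ []) (k : Nat) (prev : Int) :
    go prev pts (k : Int) =
      omax ((PySem.List.combinations (pvBase (pts.length - 1)) k).map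
        (fun c => minof (removeRock (gaps prev pts) c))) := by
  induction pts generalizing k prev with
  | nil => exact absurd rfl hne
  | cons x rest ih =>
    cases rest with
    | nil =>
      cases k with
      | zero =>
        simp [go, PySem.List.combinations_zero, removeRock, removeRockAux, gaps, minof,
              PySem.List.min?_id_cons, omax, ostep, pvBase]
      | succ k' =>
        have hg : ((([x] : List Int)).length : Int) ≤ ((k' + 1 : Nat) : Int) := by
          simp only [List.length_cons, List.length_nil]; omega
        rw [show ([x] : List Int).length - 1 = 0 from rfl]
        rw [show pvBase 0 = [] from rfl, PySem.List.combinations_nil_succ]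
        simp only [go]
        rw [if_pos hg]
        rfl
    | cons y t =>
      by_cases hbig : (((x :: y :: t) : List Int).length : Int) ≤ (k : Int)
      · have hlen : (pvBase ((x :: y :: t).length - 1)).length < k := by
          simp only [pvBase, List.length_map, List.length_range, List.length_cons] at *
          omega
        rw [PySem.List.combinations_eq_nil_of_length_lt _ hlen]
        simp only [go]
        rw [if_pos hbig]
        rfl
      · have hrestne : (y :: t : List Int) ≠ [] := by simp
        rw [show ((x :: y :: t) : List Int).length - 1 = t.length + 1 from rfl, pvBase_succ]
        cases k with
        | zero =>
          have ihk := ih hrestne 0 x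
          rw [show ((y :: t) : List Int).length - 1 = t.length from rfl,
              PySem.List.combinations_zero] at ihk
          simp only [List.map_cons, List.map_nil] at ihk
          rw [PySem.List.combinations_zero]
          simp only [List.map_cons, List.map_nil]
          have hmin : minof (removeRock (gaps prev (x :: y :: t)) []) =
              min (x - prev) (minof (removeRock (gaps x (y :: t)) [])) := by
            show minof (gaps prev (x :: y :: t)) = _
            rw [show gaps prev (x :: y :: t) = (x - prev) :: gaps x (y :: t) from rfl]
            exact minof_cons _ _ (by simp [gaps])
          rw [hmin]
          simp only [go]
          rw [if_neg (by exact_mod_cast hbig)]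
          have hk0 : ¬ ((0 : Int) < ((0 : Nat) : Int)) := by norm_num
          rw [if_neg hk0]
          rw [ihk]
          simp [omax, ostep]
        | succ k' =>
          have hkle : k' + 1 ≤ t.length + 1 := by
            simp only [List.length_cons] at hbig; push_cast at hbig; omega
          rw [PySem.List.combinations_cons_succ, List.map_append, omax_append]
          -- drop part
          have hL1 : (List.map (fun c => (0 : Int) :: c)
                (PySem.List.combinations ((pvBase t.length).map (fun z => z + 1)) k')).map
                  (fun c => minof (removeRock (gaps prev (x :: y :: t)) c))
              = (PySem.List.combinations (pvBase t.length) k').map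
                  (fun c' => minof (removeRock (gaps prev (y :: t)) c')) := by
            rw [PySem.List.combinations_map, List.map_map, List.map_map]
            apply List.map_congr_left
            intro c' _
            simp only [Function.comp_apply]
            congr 1
            show removeRockAux ((x - prev) :: (y - x) :: gaps y t) 0
                (0 :: c'.map (fun z => z + 1)) = _
            rw [rr_head0]
            have he : y - x + (x - prev) = y - prev := by ring
            rw [he]
            have hsh := rr_shift c' ((y - prev) :: gaps y t) 0
            norm_num at hsh
            rw [hsh]
            rfl
          -- keep part
          have hL2 : (PySem.List.combinations ((pvBase t.length).map (fun z => z + 1))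
                (k' + 1)).map (fun c => minof (removeRock (gaps prev (x :: y :: t)) c))
              = ((PySem.List.combinations (pvBase t.length) (k' + 1)).map
                  (fun c' => minof (removeRock (gaps x (y :: t)) c'))).map
                  (fun v => min (x - prev) v) := by
            rw [PySem.List.combinations_map, List.map_map, List.map_map]
            apply List.map_congr_left
            intro c' hc'
            obtain ⟨hsub, hlenc⟩ := (PySem.List.mem_combinations_iff _ _ _).mp hc'
            have hcle : k' + 1 ≤ t.length := by
              have := hsub.length_le
              simpa [pvBase, hlenc] using this
            simp only [Function.comp_apply]
            have hskip : removeRockAux ((x - prev) :: gaps x (y :: t)) 0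
                (c'.map (fun z => z + 1)) =
                (x - prev) :: removeRockAux (gaps x (y :: t)) (0 + 1)
                  (c'.map (fun z => z + 1)) := by
              apply rr_cons_skip
              · intro i hi
                obtain ⟨j, hj, rfl⟩ := List.mem_map.mp hi
                have hjb := mem_pvBase (hsub.subset hj)
                have hl : ((gaps x (y :: t)).length : Int) = (t.length : Int) + 1 := by
                  rw [gaps_length]; push_cast [List.length_cons]; ring
                rw [hl]
                omega
              · refine List.Pairwise.map _ ?_ ((pvBase_pairwise t.length).sublist hsub)
                intro a b hab
                omega
            show minof (removeRockAux ((x - prev) :: gaps x (y :: t)) 0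
                (c'.map (fun z => z + 1))) = _
            rw [hskip, rr_shift]
            show minof ((x - prev) :: removeRockAux (gaps x (y :: t)) 0 c') =
                min (x - prev) (minof (removeRockAux (gaps x (y :: t)) 0 c'))
            apply minof_cons
            have hge := rr_len_ge c' (gaps x (y :: t)) 0
            rw [gaps_length] at hge
            simp only [List.length_cons, hlenc] at hge
            intro hnil
            rw [hnil] at hge
            simp only [List.length_nil] at hge
            omega
          rw [hL1, hL2]
          have ih1 := ih hrestne k' prev
          have ih2 := ih hrestne (k' + 1) x
          rw [show ((y :: t) : List Int).length - 1 = t.length from rfl] at ih1 ih2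
          rw [omax_map_min, ← ih1, ← ih2]
          -- now reduce go on the left
          simp only [go]
          rw [if_neg (by exact_mod_cast hbig)]
          have hpos : (0 : Int) < ((k' + 1 : Nat) : Int) := by push_cast; omega
          rw [if_pos hpos]
          have hcast : ((k' + 1 : Nat) : Int) - 1 = ((k' : Nat) : Int) := by push_cast; ring
          rw [hcast]
          cases hgo1 : go x (y :: t) ((k' + 1 : Nat) : Int) with
          | none =>
            cases hgo2 : go prev (y :: t) ((k' : Nat) : Int) with
            | none => simp [omerge]
            | some m2 => simp [omerge]
          | some m1 =>
            cases hgo2 : go prev (y :: t) ((k' : Nat) : Int) with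
            | none => simp [omerge]
            | some m2 => simp [omerge, max_comm]

theorem buildDiff (l : List Int) (p : Int) :
    (List.range l.length).map (fun j => l.getD j 0 - (p :: l).getD j 0) = gaps p l := by
  induction l generalizing p with
  | nil => rfl
  | cons z zs ih =>
    show (List.range (zs.length + 1)).map _ = _
    rw [List.range_succ_eq_map, List.map_cons, List.map_map]
    simp only [List.getD_cons_zero, gaps]
    congr 1
    rw [← ih z]
    apply List.map_congr_left
    intro j _
    simp [Function.comp]

-- ===== VERDICT (by name: the statement is the Claim_ definition above) =====
-- `range(1, len(r2))` is the successor indices 1,…,len-1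
theorem pyRange_one_succ_map (L : Nat) :
    PySem.List.pyRange 1 ((L + 1 : Nat) : Int) 1 =
      (List.range L).map (fun j => Int.ofNat j + 1) := by
  have h0 := PySem.List.pyRange_zero_natCast (L + 1)
  rw [List.range_succ_eq_map, List.map_cons, List.map_map] at h0
  have h1 : PySem.List.pyRange 0 ((L + 1 : Nat) : Int) 1 =
      0 :: PySem.List.pyRange (0 + 1) ((L + 1 : Nat) : Int) 1 :=
    PySem.List.pyRange_one_cons (by push_cast; omega)
  rw [h1] at h0
  rw [show (((0 : Nat) : Int)) = (0 : Int) from rfl] at h0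
  have h2 := (List.cons_eq_cons.mp h0).2
  rw [show ((0 : Int) + 1) = 1 from by norm_num] at h2
  rw [h2]
  apply List.map_congr_left
  intro j _
  simp only [Function.comp_apply, Int.ofNat_eq_natCast]
  push_cast
  ring

theorem foldl_max_minof (f : List Int → Int) (L : List (List Int)) :
    L.foldl (fun mx ls => max mx (f ls)) 0 =
      match omax (L.map f) with | none => 0 | some m => max 0 m := by
  rw [← foldl_max_zero, List.foldl_map]

theorem solution_spec : Claim_equal_solution := by
  unfold Claim_equal_solution
  intro distance rocks n _ hpre
  unfold Spec_solution solution solution_alt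
  unfold Pre_solution at hpre
  dsimp only
  set s := PySem.List.sorted rocks (fun x => x) false with hs
  set pts := s ++ [distance] with hpts
  have hr2 : PySem.List.insert s 0 0 ++ [distance] = 0 :: pts := by
    rw [PySem.List.insert_zero]; rfl
  rw [hr2]
  have hptsne : pts ≠ [] := by simp [hpts]
  -- the diff-building loop computes the gap list
  have hdiff : (PySem.List.pyRange 1 (((0 :: pts).length : Int)) 1).foldl
      (fun acc i => acc ++ [PySem.List.pyGetD (0 :: pts) i 0 -
        PySem.List.pyGetD (0 :: pts) (i - 1) 0]) [] = gaps 0 pts := by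
    rw [PySem.List.foldl_append_singleton_eq_map, List.nil_append]
    rw [show (((0 :: pts).length : Int)) = ((pts.length + 1 : Nat) : Int) from by
      simp [List.length_cons]]
    rw [pyRange_one_succ_map, List.map_map]
    rw [← buildDiff pts 0]
    apply List.map_congr_left
    intro j _
    simp only [Function.comp_apply]
    have hc1 : Int.ofNat j + 1 = ((j + 1 : Nat) : Int) := by
      simp only [Int.ofNat_eq_natCast]; push_cast; ring
    have e1 : PySem.List.pyGetD (0 :: pts) (Int.ofNat j + 1) 0 = pts.getD j 0 := by
      rw [hc1, PySem.List.pyGetD_natCast]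
      simp
    have e2 : PySem.List.pyGetD (0 :: pts) (Int.ofNat j + 1 - 1) 0 =
        (0 :: pts).getD j 0 := by
      rw [show (Int.ofNat j + 1 - 1) = ((j : Nat) : Int) from by
        simp only [Int.ofNat_eq_natCast]; ring]
      rw [PySem.List.pyGetD_natCast]
    rw [e1, e2]
  rw [hdiff]
  rw [if_neg (by omega : ¬ n < 0)]
  have hlen1 : 1 ≤ pts.length := by
    rw [hpts, List.length_append, List.length_cons]; omega
  have hrange : PySem.List.pyRange 0 (((gaps 0 pts).length : Int) - 1) 1 =
      pvBase (pts.length - 1) := by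
    rw [gaps_length]
    rw [show ((pts.length : Int) - 1) = ((pts.length - 1 : Nat) : Int) from by
      push_cast [Nat.cast_sub hlen1]; ring]
    rw [PySem.List.pyRange_zero_natCast]
    rfl
  rw [hrange]
  rw [foldl_max_minof (fun ls =>
    (PySem.List.min? (removeRock (gaps 0 pts) ls) (fun x => x)).getD 0)]
  have hn : go 0 pts n = go 0 pts ((n.toNat : Nat) : Int) := by
    congr 1
    omega
  rw [hn, goSpec pts hptsne n.toNat 0]
  show (match omax ((PySem.List.combinations (pvBase (pts.length - 1)) n.toNat).map
      (fun ls => (PySem.List.min? (removeRock (gaps 0 pts) ls) (fun x => x)).getD 0)) with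
    | none => (0 : Int) | some m => max 0 m) =
    (match omax ((PySem.List.combinations (pvBase (pts.length - 1)) n.toNat).map
      (fun ls => (PySem.List.min? (removeRock (gaps 0 pts) ls) (fun x => x)).getD 0)) with
    | some best => max 0 best | none => 0)
  cases omax ((PySem.List.combinations (pvBase (pts.length - 1)) n.toNat).map
      (fun ls => (PySem.List.min? (removeRock (gaps 0 pts) ls) (fun x => x)).getD 0)) <;> rfl
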